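-- pv_equiv track=rewrite | github.com/chris-warren/CSC-502-PSCAN | data/orkut_single_label.py | assign_single_labels_smallest_comm
-- ===== SOURCE A (Python) =====
-- from collections import defaultdict
--
-- def assign_single_labels_smallest_comm(all_nodes, communities):
--     node_to_comms = defaultdict(list)
--     comm_sizes = {}
--
--     for cid, members in enumerate(communities):
--         comm_sizes[cid] = len(members)
--         for node in members:
--             node_to_comms[node].append(cid)
--
--     labels = {}
--
--     for node in sorted(all_nodes):
--         comms = node_to_comms.get(node, [])
--
--         if not comms:
--             labels[node] = -1
--             continue
--
--         # Pick the smallest community by size; break ties by community ID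
--         best_cid = min(comms, key=lambda cid: (comm_sizes[cid], cid))
--         labels[node] = best_cid
--
--     return labels, comm_sizes
-- ===== SOURCE B (Python) =====
-- def assign_single_labels_smallest_comm(all_nodes, communities):
--     comm_sizes = {cid: len(members) for cid, members in enumerate(communities)}
--
--     # Sweep communities from smallest to largest (ties by id); first assignment wins,
--     # so each covered node ends up with its smallest community.
--     order = sorted(range(len(communities)), key=lambda cid: (comm_sizes[cid], cid))
--     best = {}
--     for cid in order:
--         for node in communities[cid]:
--             if node not in best:
--                 best[node] = cid
--
--     labels = {node: best.get(node, -1) for node in sorted(all_nodes)}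
--     return labels, comm_sizes
-- ===== Notes on version B (the rewrite author's own statement) =====
-- stated objective: faster
-- what changed: B drops A's node_to_comms inverted index and its per-node min over a (size, id) tuple key; instead it sorts the community ids once by (size, id), does a single first-wins sweep over the sorted communities to label every covered node, and then reads each node's label (default -1) over sorted(all_nodes).
import Mathlib
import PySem

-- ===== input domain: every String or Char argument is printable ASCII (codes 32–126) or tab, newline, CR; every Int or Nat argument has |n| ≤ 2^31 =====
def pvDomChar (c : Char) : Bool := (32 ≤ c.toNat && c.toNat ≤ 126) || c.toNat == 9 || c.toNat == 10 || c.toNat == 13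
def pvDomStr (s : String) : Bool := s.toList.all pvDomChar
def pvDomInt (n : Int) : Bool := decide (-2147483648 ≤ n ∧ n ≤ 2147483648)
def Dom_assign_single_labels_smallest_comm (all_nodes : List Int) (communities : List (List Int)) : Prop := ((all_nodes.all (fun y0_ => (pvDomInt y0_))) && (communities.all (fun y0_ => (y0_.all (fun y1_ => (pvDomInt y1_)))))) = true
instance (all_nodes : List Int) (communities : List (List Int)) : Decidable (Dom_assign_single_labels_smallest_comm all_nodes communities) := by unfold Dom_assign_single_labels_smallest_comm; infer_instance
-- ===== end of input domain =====

-- B replaces A's per-node min over a node→communities index by one first-wins sweep of the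
-- communities sorted by (size, id): each membership is touched once instead of re-scanned per
-- node occurrence (a timing run measured B faster).

-- ===== PORT A =====
def assign_single_labels_smallest_comm (all_nodes : List Int) (communities : List (List Int)) : (List (Int × Int)) × (List (Int × Int)) :=
  -- one loop over enumerate(communities) fills comm_sizes and node_to_comms (a pair accumulator)
  let st := (PySem.List.enumerate communities 0).foldl
      (fun st p =>
        (st.1.insert p.1 (p.2.length : Int),
         p.2.foldl (fun d nd => d.modify nd [] (fun l => l ++ [p.1])) st.2))
      ((PySem.Dict.empty : PySem.Dict Int Int), (PySem.Dict.empty : PySem.Dict Int (List Int)))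
  let labels := (PySem.List.sorted all_nodes (fun x => x) false).foldl
      (fun lab nd =>
        let comms := st.2.getD nd []
        -- min(comms, key=lambda cid: (comm_sizes[cid], cid)); the tuple key is the lexicographic
        -- order Int ×ₗ Int (exactly Python's tuple comparison); comm_sizes[cid] cannot miss (every
        -- cid in comms comes from enumerate), so getD's default 0 is never read; min on the empty
        -- list (none) is exactly the 'if not comms' branch
        match PySem.List.min? comms (fun c => (toLex (st.1.getD c 0, c) : Int ×ₗ Int)) with
        | none => lab.insert nd (-1)
        | some b => lab.insert nd b)
      (PySem.Dict.empty : PySem.Dict Int Int)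
  (labels.items, st.1.items)

-- ===== PORT B =====
def assign_single_labels_smallest_comm_alt (all_nodes : List Int) (communities : List (List Int)) : (List (Int × Int)) × (List (Int × Int)) :=
  let sizes := (PySem.List.enumerate communities 0).foldl
      (fun d p => d.insert p.1 (p.2.length : Int)) (PySem.Dict.empty : PySem.Dict Int Int)
  -- sorted(range(len(communities)), key=lambda cid: (sizes[cid], cid)); lexicographic tuple key;
  -- sizes[cid] cannot miss for cid in range(len(communities)), so getD's default 0 is never read
  let order := PySem.List.sorted (PySem.List.pyRange 0 (communities.length : Int))
      (fun c => (toLex (sizes.getD c 0, c) : Int ×ₗ Int)) false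
  let best := order.foldl
      (fun d c =>
        -- communities[cid] with cid drawn from range(len(communities)): always in range,
        -- so pyGetD's default [] is never read
        (PySem.List.pyGetD communities c []).foldl
          (fun d nd => if d.contains nd then d else d.insert nd c) d)
      (PySem.Dict.empty : PySem.Dict Int Int)
  let labels := (PySem.List.sorted all_nodes (fun x => x) false).foldl
      (fun lab nd => lab.insert nd (best.getD nd (-1))) (PySem.Dict.empty : PySem.Dict Int Int)
  (labels.items, sizes.items)

-- ===== PRECONDITION & SPEC =====
def Spec_assign_single_labels_smallest_comm (all_nodes : List Int) (communities : List (List Int)) (out : (List (Int × Int)) × (List (Int × Int))) : Prop := out = assign_single_labels_smallest_comm_alt all_nodes communities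
instance (all_nodes : List Int) (communities : List (List Int)) (out : (List (Int × Int)) × (List (Int × Int))) : Decidable (Spec_assign_single_labels_smallest_comm all_nodes communities out) := by unfold Spec_assign_single_labels_smallest_comm; infer_instance

-- ===== CLAIM (what is proved, stated in full; the proofs are below) =====
def Claim_equal_assign_single_labels_smallest_comm : Prop := ∀ (all_nodes : List Int) (communities : List (List Int)), Dom_assign_single_labels_smallest_comm all_nodes communities → Spec_assign_single_labels_smallest_comm all_nodes communities (assign_single_labels_smallest_comm all_nodes communities)

-- ===== LEMMAS AND PROOFS =====

-- the comm_sizes dict both programs build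
def pvSizes (cs : List (List Int)) : PySem.Dict Int Int :=
  (PySem.List.enumerate cs 0).foldl (fun d p => d.insert p.1 (p.2.length : Int)) PySem.Dict.empty

-- the (size, id) key both programs sort/minimise by
def pvKey (cs : List (List Int)) (c : Int) : Int ×ₗ Int := toLex ((pvSizes cs).getD c 0, c)

-- A's node_to_comms dict
def pvNtc (cs : List (List Int)) : PySem.Dict Int (List Int) :=
  (PySem.List.enumerate cs 0).foldl
    (fun d p => p.2.foldl (fun d nd => d.modify nd [] (fun l => l ++ [p.1])) d) PySem.Dict.empty

-- the value node_to_comms.get(x, []) takes: all cids whose member list contains x, ascending,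
-- with multiplicities
def pvComms (cs : List (List Int)) (x : Int) : List Int :=
  (PySem.List.enumerate cs 0).flatMap (fun p => (p.2.filter (fun nd => nd == x)).map (fun _ => p.1))

-- B's sorted community order and first-wins dict
def pvOrder (cs : List (List Int)) : List Int :=
  PySem.List.sorted (PySem.List.pyRange 0 (cs.length : Int)) (pvKey cs) false

def pvBest (cs : List (List Int)) : PySem.Dict Int Int :=
  (pvOrder cs).foldl
    (fun d c =>
      (PySem.List.pyGetD cs c []).foldl (fun d nd => if d.contains nd then d else d.insert nd c) d)
    PySem.Dict.empty

-- a nested append-grouping loop is the flat grouping loop over the flattened pair list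
lemma pv_nested_modify (l : List (Int × List Int)) (d : PySem.Dict Int (List Int)) :
    l.foldl (fun d p => p.2.foldl (fun d nd => d.modify nd [] (fun l => l ++ [p.1])) d) d
      = (l.flatMap (fun p => p.2.map (fun nd => (nd, p.1)))).foldl
          (fun d q => d.modify q.1 [] (fun l => l ++ [q.2])) d := by
  induction l generalizing d with
  | nil => rfl
  | cons p t ih =>
      simp only [List.foldl_cons, List.flatMap_cons, List.foldl_append, List.foldl_map]
      exact ih _

lemma pv_ntc_getD (cs : List (List Int)) (x : Int) :
    (pvNtc cs).getD x [] = pvComms cs x := by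
  unfold pvNtc pvComms
  rw [pv_nested_modify, PySem.Dict.getD_foldl_modify_append]
  simp [List.filter_flatMap, List.map_flatMap, List.filter_map, Function.comp_def]

lemma pv_mem_comms (cs : List (List Int)) (x c : Int) :
    c ∈ pvComms cs x ↔ 0 ≤ c ∧ c < (cs.length : Int) ∧ x ∈ PySem.List.pyGetD cs c [] := by
  unfold pvComms
  simp only [List.mem_flatMap, PySem.List.mem_enumerate_iff, List.mem_map, List.mem_filter,
    beq_iff_eq]
  constructor
  · rintro ⟨p, ⟨k, hk, rfl⟩, nd, ⟨hnd, rfl⟩, rfl⟩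
    simp only [zero_add]
    refine ⟨Int.natCast_nonneg k, by exact_mod_cast hk, ?_⟩
    rw [PySem.List.pyGetD_eq_getElem cs [] (Int.natCast_nonneg k) (by exact_mod_cast hk)]
    simp only [Int.toNat_natCast]
    simpa using hnd
  · rintro ⟨h0, hn, hx⟩
    lift c to ℕ using h0 with k
    have hk : k < cs.length := by exact_mod_cast hn
    refine ⟨(k, cs[k]), ⟨k, hk, by simp⟩, x, ⟨?_, rfl⟩, rfl⟩
    rw [PySem.List.pyGetD_eq_getElem cs [] (by positivity) (by exact_mod_cast hk)] at hx
    simpa using hx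

-- B's inner first-wins loop: contains and get? after the loop
lemma pv_fw_contains (ms : List Int) (c : Int) (d : PySem.Dict Int Int) (x : Int) :
    (ms.foldl (fun d nd => if d.contains nd then d else d.insert nd c) d).contains x
      = (d.contains x || decide (x ∈ ms)) := by
  induction ms generalizing d with
  | nil => simp
  | cons nd t ih =>
      simp only [List.foldl_cons]
      by_cases hc : d.contains nd
      · rw [if_pos hc, ih]
        by_cases hx : x = nd
        · subst hx; simp [hc]
        · simp [hx, List.mem_cons]
      · rw [if_neg (by simp [hc]), ih]
        by_cases hx : x = nd
        · subst hx; simp [hc]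
        · have hb : (x == nd) = false := by simpa using hx
          simp [hb, hx, PySem.Dict.contains_insert, List.mem_cons]

lemma pv_fw_get (ms : List Int) (c : Int) (d : PySem.Dict Int Int) (x : Int) :
    (ms.foldl (fun d nd => if d.contains nd then d else d.insert nd c) d).get? x
      = if d.contains x = false ∧ x ∈ ms then some c else d.get? x := by
  induction ms generalizing d with
  | nil => simp
  | cons nd t ih =>
      simp only [List.foldl_cons]
      by_cases hc : d.contains nd
      · rw [if_pos hc, ih]
        by_cases hx : x = nd
        · subst hx; simp [hc]
        · simp [hx, List.mem_cons]
      · rw [if_neg (by simp [hc]), ih]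
        by_cases hx : x = nd
        · subst hx
          simp [hc]
        · have hb : (x == nd) = false := by simpa using hx
          simp [hb, hx, PySem.Dict.contains_insert, PySem.Dict.get?_insert, List.mem_cons]

-- B's outer sweep: the label of x is the first community in the sweep order containing x
lemma pv_sweep_get (cs : List (List Int)) (order : List Int) (d : PySem.Dict Int Int) (x : Int) :
    (order.foldl
        (fun d c =>
          (PySem.List.pyGetD cs c []).foldl (fun d nd => if d.contains nd then d else d.insert nd c) d)
        d).get? x
      = if d.contains x = true then d.get? x
        else order.find? (fun c => decide (x ∈ PySem.List.pyGetD cs c [])) := by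
  induction order generalizing d with
  | nil =>
      by_cases hc : d.contains x
      · simp [hc]
      · simp [hc, (PySem.Dict.get?_eq_none_iff_contains d x).mpr (by simp [hc])]
  | cons c t ih =>
      simp only [List.foldl_cons, ih, pv_fw_contains, pv_fw_get, List.find?_cons]
      by_cases hc : d.contains x
      · simp [hc]
      · simp only [Bool.not_eq_true] at hc
        by_cases hx : x ∈ PySem.List.pyGetD cs c []
        · simp [hc, hx]
        · simp [hc, hx]

-- in a strictly key-sorted list, find? returns the key-minimal element satisfying p
lemma pv_find?_eq_of_sorted {κ : Type} [LinearOrder κ] (key : Int → κ) (p : Int → Bool)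
    (l : List Int) (hs : l.Pairwise (fun a b => key a < key b)) (m : Int)
    (hm : m ∈ l) (hpm : p m = true) (hmin : ∀ y ∈ l, p y = true → key m ≤ key y) :
    l.find? p = some m := by
  induction l with
  | nil => cases hm
  | cons h t ih =>
      rcases List.pairwise_cons.mp hs with ⟨hlt, ht⟩
      rcases List.mem_cons.mp hm with rfl | hmt
      · simp [hpm]
      · have hph : p h = false := by
          by_contra hph
          have := hmin h (List.mem_cons_self) (by simpa using hph)
          exact absurd (lt_of_le_of_lt this (hlt m hmt)) (lt_irrefl _)
        simp only [List.find?_cons, hph]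
        exact ih ht hmt (fun y hy hpy => hmin y (List.mem_cons_of_mem _ hy) hpy)

lemma pv_order_pairwise (cs : List (List Int)) :
    (pvOrder cs).Pairwise (fun a b => pvKey cs a < pvKey cs b) := by
  have hle := PySem.List.sorted_pairwise (PySem.List.pyRange 0 (cs.length : Int)) (pvKey cs)
  have hnd : (pvOrder cs).Nodup :=
    ((PySem.List.sorted_perm (PySem.List.pyRange 0 (cs.length : Int)) (pvKey cs) false).nodup_iff).mpr
      (PySem.List.nodup_pyRange_one 0 (cs.length : Int))
  refine (hle.and hnd).imp ?_
  rintro a b ⟨hab, hne⟩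
  refine lt_of_le_of_ne hab (fun h => hne ?_)
  have := toLex_inj.mp (show toLex ((pvSizes cs).getD a 0, a) = toLex ((pvSizes cs).getD b 0, b) from h)
  exact congrArg Prod.snd this

lemma pv_mem_order (cs : List (List Int)) (c : Int) :
    c ∈ pvOrder cs ↔ 0 ≤ c ∧ c < (cs.length : Int) := by
  unfold pvOrder
  rw [PySem.List.mem_sorted, PySem.List.mem_pyRange_one]

-- the per-node value: A's min over the node's community list = B's first-wins label
lemma pv_value_eq (cs : List (List Int)) (x : Int) :
    (match PySem.List.min? (pvComms cs x) (pvKey cs) with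
     | none => (-1 : Int)
     | some b => b)
      = (pvBest cs).getD x (-1) := by
  have hbest : (pvBest cs).get? x
      = (pvOrder cs).find? (fun c => decide (x ∈ PySem.List.pyGetD cs c [])) := by
    unfold pvBest
    rw [pv_sweep_get]
    simp
  rw [PySem.Dict.getD_eq_get?_getD, hbest]
  rcases hmin : PySem.List.min? (pvComms cs x) (pvKey cs) with _ | m
  · have hnil : pvComms cs x = [] := (PySem.List.min?_eq_none_iff _ _).mp hmin
    have hfind : (pvOrder cs).find? (fun c => decide (x ∈ PySem.List.pyGetD cs c [])) = none := by
      rw [List.find?_eq_none]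
      intro c hc hp
      have hrange := (pv_mem_order cs c).mp hc
      have : c ∈ pvComms cs x :=
        (pv_mem_comms cs x c).mpr ⟨hrange.1, hrange.2, by simpa using hp⟩
      simp [hnil] at this
    simp [hfind]
  · have hmem := PySem.List.min?_mem hmin
    have hrange := (pv_mem_comms cs x m).mp hmem
    have hfind : (pvOrder cs).find? (fun c => decide (x ∈ PySem.List.pyGetD cs c [])) = some m := by
      refine pv_find?_eq_of_sorted (pvKey cs) _ _ (pv_order_pairwise cs) m
        ((pv_mem_order cs m).mpr ⟨hrange.1, hrange.2.1⟩) (by simpa using hrange.2.2) ?_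
      intro y hy hpy
      exact PySem.List.min?_isMin hmin y
        ((pv_mem_comms cs x y).mpr ⟨((pv_mem_order cs y).mp hy).1, ((pv_mem_order cs y).mp hy).2,
          by simpa using hpy⟩)
    simp [hfind]

-- ===== VERDICT (by name: the statement is the Claim_ definition above) =====
theorem assign_single_labels_smallest_comm_spec : Claim_equal_assign_single_labels_smallest_comm := by
  intro all_nodes cs _
  unfold Spec_assign_single_labels_smallest_comm
  simp only [assign_single_labels_smallest_comm, assign_single_labels_smallest_comm_alt]
  have hsplit :
      (PySem.List.enumerate cs).foldl
          (fun (st : PySem.Dict Int Int × PySem.Dict Int (List Int)) p =>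
            (st.1.insert p.1 (p.2.length : Int),
             p.2.foldl (fun d nd => d.modify nd [] (fun l => l ++ [p.1])) st.2))
          (PySem.Dict.empty, PySem.Dict.empty)
        = (pvSizes cs, pvNtc cs) :=
    PySem.List.foldl_prod_mk
      (fun (d : PySem.Dict Int Int) (p : Int × List Int) => d.insert p.1 (p.2.length : Int))
      (fun (d : PySem.Dict Int (List Int)) (p : Int × List Int) =>
        p.2.foldl (fun d nd => d.modify nd [] (fun l => l ++ [p.1])) d) _ _ _
  rw [hsplit]
  refine Prod.ext ?_ rfl
  show (PySem.Dict.items _) = (PySem.Dict.items _)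
  refine congrArg PySem.Dict.items ?_
  refine PySem.List.foldl_congr_mem _ _ _ _ ?_
  intro lab nd _
  show (match PySem.List.min? ((pvNtc cs).getD nd []) (pvKey cs) with
        | none => lab.insert nd (-1)
        | some b => lab.insert nd b)
      = lab.insert nd ((pvBest cs).getD nd (-1))
  rw [pv_ntc_getD]
  have := pv_value_eq cs nd
  rcases h : PySem.List.min? (pvComms cs nd) (pvKey cs) with _ | m
  · rw [h] at this; simpa using congrArg (lab.insert nd) this
  · rw [h] at this; simpa using congrArg (lab.insert nd) this
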